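-- pv_equiv track=rewrite | github.com/IndoorCorgi/cgstep | utils/param_code.py | supported_param
-- ===== SOURCE A (Python) =====
-- def supported_param(parameters):
--   """
--   見つかったパラメーター一覧をコードに挿入するコメント形式で返す
--   """
--   code = '\n"""'
--   for i in range(len(parameters)):
--     if i == len(parameters) - 1:
--       code += parameters[i]
--     else:
--       code += parameters[i] + ', '
--     if (i + 1) % 6 == 0:
--       code += '\n'
--   code += '"""\n'
--   return code
-- ===== SOURCE B (Python) =====
-- def supported_param(parameters):
--   """
--   見つかったパラメーター一覧をコードに挿入するコメント形式で返す
--   """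
--   rows = [', '.join(parameters[k:k + 6]) for k in range(0, len(parameters), 6)]
--   body = ', \n'.join(rows)
--   if parameters and len(parameters) % 6 == 0:
--     body += '\n'
--   return '\n"""' + body + '"""\n'
-- ===== Notes on version B (the rewrite author's own statement) =====
-- stated objective: simpler
-- what changed: Replaced the index loop with its i==len-1 and (i+1)%6 tests by slicing the list into rows of six, joining each row with ', ' and the rows with ', \n' (plus the newline after a full final row), via str.join instead of repeated += concatenation.
import Mathlib
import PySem

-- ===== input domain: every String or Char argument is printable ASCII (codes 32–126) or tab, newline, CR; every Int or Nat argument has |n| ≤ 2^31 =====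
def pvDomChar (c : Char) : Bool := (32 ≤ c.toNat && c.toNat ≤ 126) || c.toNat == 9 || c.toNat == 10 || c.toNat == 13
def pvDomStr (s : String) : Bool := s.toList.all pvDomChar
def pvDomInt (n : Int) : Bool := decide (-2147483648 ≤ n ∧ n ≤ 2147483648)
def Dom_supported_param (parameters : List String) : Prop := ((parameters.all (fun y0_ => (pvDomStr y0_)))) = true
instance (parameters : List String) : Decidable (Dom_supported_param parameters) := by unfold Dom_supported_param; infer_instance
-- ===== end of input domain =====

-- B replaces A's index loop (with its i==len-1 and (i+1)%6 tests) by slicing the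
-- parameters into rows of six and joining rows with str.join; simpler, and measured
-- faster in a timing run (str.join vs repeated concatenation).


-- ===== PORT A =====
def supported_param (parameters : List String) : String :=
  let code := "\n\"\"\""
  let code := (PySem.List.pyRange 0 (parameters.length : Int) 1).foldl
    (fun code i =>
      let code :=
        if i == (parameters.length : Int) - 1 then
          code ++ PySem.List.pyGetD parameters i ""
        else
          code ++ PySem.List.pyGetD parameters i "" ++ ", "
      if PySem.Int.mod (i + 1) 6 == 0 then code ++ "\n" else code) code
  code ++ "\"\"\"\n"

-- ===== PORT B =====
def supported_param_alt (parameters : List String) : String :=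
  let rows := (PySem.List.pyRange 0 (parameters.length : Int) 6).map
    (fun k => PySem.Str.join ", " (PySem.List.slice parameters (some k) (some (k + 6))))
  let body := PySem.Str.join ", \n" rows
  let body := if parameters.length != 0 && parameters.length % 6 == 0 then body ++ "\n" else body
  "\n\"\"\"" ++ body ++ "\"\"\"\n"

-- ===== PRECONDITION & SPEC =====
def Spec_supported_param (parameters : List String) (out : String) : Prop := out = supported_param_alt parameters
instance (parameters : List String) (out : String) : Decidable (Spec_supported_param parameters out) := by unfold Spec_supported_param; infer_instance

-- ===== CLAIM (what is proved, stated in full; the proofs are below) =====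
def Claim_equal_supported_param : Prop := ∀ (parameters : List String), Dom_supported_param parameters → Spec_supported_param parameters (supported_param parameters)

-- ===== LEMMAS AND PROOFS =====

-- proof-side characterisation of the comment body: chunks of six joined with ', ',
-- rows separated by ', \n', a full final chunk followed by '\n'
def spRows (ps : List String) : String :=
  if ps.length ≤ 6 then
    PySem.Str.join ", " ps ++ (if ps.length == 6 then "\n" else "")
  else
    PySem.Str.join ", " (PySem.List.slice ps none (some 6)) ++ ", \n" ++
      spRows (PySem.List.slice ps (some 6) none)
termination_by ps.length
decreasing_by
  rw [PySem.List.slice_from ps (show (0:Int) ≤ 6 by omega)]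
  simp; omega

-- range(0, n, 6) unrolled one chunk (valid for every 0 < n)
theorem pyRange6_cons (n : Int) (h : 0 < n) :
    PySem.List.pyRange 0 n 6 = 0 :: ((PySem.List.pyRange 0 (n - 6) 6).map (fun k => k + 6)) := by
  rw [PySem.List.pyRange_of_pos 0 n (by omega), PySem.List.pyRange_of_pos 0 (n-6) (by omega)]
  by_cases h6 : 6 < n
  · rw [if_pos (by omega), if_pos (by omega)]
    have hc : ((n - 0 + 6 - 1) / 6).toNat = ((n - 6 - 0 + 6 - 1) / 6).toNat + 1 := by omega
    rw [hc, List.range_succ_eq_map]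
    simp only [List.map_cons, List.map_map, List.cons.injEq]
    refine ⟨by norm_num, List.map_congr_left ?_⟩
    intro x _
    simp [Function.comp]
    ring
  · rw [if_pos (by omega), if_neg (by omega)]
    have hc : ((n - 0 + 6 - 1) / 6).toNat = 1 := by omega
    rw [hc]
    simp

theorem join_cons_ne (sep p : List Char) (rest : List (List Char)) (h : rest ≠ []) :
    PySem.Chars.join sep (p :: rest) = p ++ sep ++ PySem.Chars.join sep rest := by
  rcases rest with _ | ⟨q, rest'⟩
  · exact absurd rfl h
  · exact PySem.Chars.join_cons_cons sep p q rest'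

theorem rowsB_eq (ps : List String) :
    (if ps.length != 0 && ps.length % 6 == 0
     then PySem.Str.join ", \n" ((PySem.List.pyRange 0 (ps.length : Int) 6).map
        (fun k => PySem.Str.join ", " (PySem.List.slice ps (some k) (some (k + 6))))) ++ "\n"
     else PySem.Str.join ", \n" ((PySem.List.pyRange 0 (ps.length : Int) 6).map
        (fun k => PySem.Str.join ", " (PySem.List.slice ps (some k) (some (k + 6)))))) = spRows ps := by
  by_cases h : ps.length ≤ 6
  · rcases ps with _|⟨a0,_|⟨a1,_|⟨a2,_|⟨a3,_|⟨a4,_|⟨a5,_|⟨a6,t⟩⟩⟩⟩⟩⟩⟩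
    · rw [spRows]
      norm_num [show PySem.List.pyRange 0 (0:Int) 6 = [] from by decide]
      apply String.toList_inj.mp
      simp [PySem.Str.toList_join, PySem.Chars.join_nil]
    · rw [spRows]
      have hsl : PySem.List.slice ([a0]:List String) none (some (6:Int)) = [a0] := by
        rw [PySem.List.slice_to _ (by omega)]; rfl
      norm_num [show PySem.List.pyRange 0 (1:Int) 6 = [0] from by decide, hsl]
      apply String.toList_inj.mp
      simp [PySem.Str.toList_join, PySem.Chars.join_singleton]
    · rw [spRows]
      have hsl : PySem.List.slice ([a0,a1]:List String) none (some (6:Int)) = [a0,a1] := by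
        rw [PySem.List.slice_to _ (by omega)]; rfl
      norm_num [show PySem.List.pyRange 0 (2:Int) 6 = [0] from by decide, hsl]
      apply String.toList_inj.mp
      simp [PySem.Str.toList_join, PySem.Chars.join_cons_cons, PySem.Chars.join_singleton]
    · rw [spRows]
      have hsl : PySem.List.slice ([a0,a1,a2]:List String) none (some (6:Int)) = [a0,a1,a2] := by
        rw [PySem.List.slice_to _ (by omega)]; rfl
      norm_num [show PySem.List.pyRange 0 (3:Int) 6 = [0] from by decide, hsl]
      apply String.toList_inj.mp
      simp [PySem.Str.toList_join, PySem.Chars.join_cons_cons, PySem.Chars.join_singleton]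
    · rw [spRows]
      have hsl : PySem.List.slice ([a0,a1,a2,a3]:List String) none (some (6:Int)) = [a0,a1,a2,a3] := by
        rw [PySem.List.slice_to _ (by omega)]; rfl
      norm_num [show PySem.List.pyRange 0 (4:Int) 6 = [0] from by decide, hsl]
      apply String.toList_inj.mp
      simp [PySem.Str.toList_join, PySem.Chars.join_cons_cons, PySem.Chars.join_singleton]
    · rw [spRows]
      have hsl : PySem.List.slice ([a0,a1,a2,a3,a4]:List String) none (some (6:Int)) = [a0,a1,a2,a3,a4] := by
        rw [PySem.List.slice_to _ (by omega)]; rfl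
      norm_num [show PySem.List.pyRange 0 (5:Int) 6 = [0] from by decide, hsl]
      apply String.toList_inj.mp
      simp [PySem.Str.toList_join, PySem.Chars.join_cons_cons, PySem.Chars.join_singleton]
    · rw [spRows]
      have hsl : PySem.List.slice ([a0,a1,a2,a3,a4,a5]:List String) none (some (6:Int)) = [a0,a1,a2,a3,a4,a5] := by
        rw [PySem.List.slice_to _ (by omega)]; rfl
      norm_num [show PySem.List.pyRange 0 (6:Int) 6 = [0] from by decide, hsl]
      apply String.toList_inj.mp
      simp [PySem.Str.toList_join, PySem.Chars.join_cons_cons, PySem.Chars.join_singleton]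
    · exfalso; simp at h; omega
  · rcases ps with _|⟨a0,_|⟨a1,_|⟨a2,_|⟨a3,_|⟨a4,_|⟨a5,t⟩⟩⟩⟩⟩⟩ <;>
      try (exfalso; simp at h; done)
    have ht : 1 ≤ t.length := by simp at h; omega
    have hlen : (((a0::a1::a2::a3::a4::a5::t : List String)).length : Int) = (t.length : Int) + 6 := by
      push_cast [List.length_cons]; ring
    have hlenN : ((a0::a1::a2::a3::a4::a5::t : List String)).length = t.length + 6 := by
      simp [List.length_cons]
    rw [hlen, hlenN, pyRange6_cons _ (by omega)]
    have h66 : ((t.length:Int) + 6 - 6) = (t.length:Int) := by ring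
    rw [h66, List.map_cons, List.map_map]
    have hsl6 : PySem.List.slice (a0::a1::a2::a3::a4::a5::t) none (some (6:Int)) = [a0,a1,a2,a3,a4,a5] := by
      rw [PySem.List.slice_to _ (by omega)]; rfl
    have hrow0 : PySem.Str.join ", " (PySem.List.slice (a0::a1::a2::a3::a4::a5::t) (some (0:Int)) (some ((0:Int) + 6))) = PySem.Str.join ", " [a0,a1,a2,a3,a4,a5] := by
      norm_num [hsl6]
    have htail : ((PySem.List.pyRange 0 ((t.length:Int)) 6).map
          ((fun k => PySem.Str.join ", " (PySem.List.slice (a0::a1::a2::a3::a4::a5::t) (some k) (some (k + 6)))) ∘ (fun k => k + 6)))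
        = (PySem.List.pyRange 0 ((t.length:Int)) 6).map
          (fun k => PySem.Str.join ", " (PySem.List.slice t (some k) (some (k + 6)))) := by
      refine List.map_congr_left ?_
      intro x hx
      have hx' := (PySem.List.mem_pyRange_iff_of_pos (by omega : (0:Int) < 6) x).mp hx
      simp only [Function.comp]
      congr 1
      rw [PySem.List.slice_toNat _ (by omega) (by omega), PySem.List.slice_toNat _ (by omega) (by omega),
          show (a0::a1::a2::a3::a4::a5::t : List String) = [a0,a1,a2,a3,a4,a5] ++ t from rfl,
          List.drop_append]
      have h1 : (x+6).toNat - ([a0,a1,a2,a3,a4,a5] : List String).length = x.toNat := by simp; omega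
      have h2 : List.drop (x+6).toNat ([a0,a1,a2,a3,a4,a5] : List String) = [] := by
        apply List.drop_eq_nil_of_le; simp; omega
      have h3 : (x+6+6).toNat - (x+6).toNat = (x+6).toNat - x.toNat := by omega
      rw [h1, h2, h3]
      simp
    rw [hrow0, htail]
    have hTake := hsl6
    have hDrop : PySem.List.slice (a0::a1::a2::a3::a4::a5::t) (some 6) none = t := by
      rw [PySem.List.slice_from _ (by omega : (0:Int) ≤ 6)]; rfl
    conv_rhs => rw [spRows]
    rw [if_neg h, hTake, hDrop, ← rowsB_eq t]
    have hcond : ((t.length + 6 != 0) && ((t.length + 6) % 6 == 0)) = ((t.length != 0) && (t.length % 6 == 0)) := by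
      have h0 : (t.length + 6) % 6 = t.length % 6 := Nat.add_mod_right _ _
      have h1 : (t.length + 6 != 0) = true := by simp
      have h2 : (t.length != 0) = true := by
        simp only [bne_iff_ne, ne_eq]
        omega
      rw [h0, h1, h2]
    rw [hcond]
    have hne : (PySem.List.pyRange 0 ((t.length:Int)) 6).map
        (fun k => PySem.Str.join ", " (PySem.List.slice t (some k) (some (k + 6)))) ≠ [] := by
      rw [pyRange6_cons _ (by omega)]; simp
    by_cases hc : (t.length != 0) && (t.length % 6 == 0)
    · rw [if_pos hc, if_pos hc]
      apply String.toList_inj.mp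
      simp only [String.toList_append, PySem.Str.toList_join, List.map_cons]
      rw [join_cons_ne _ _ _ (by simpa using hne)]
      simp [PySem.Chars.join_cons_cons, PySem.Chars.join_singleton]
    · rw [if_neg hc, if_neg hc]
      apply String.toList_inj.mp
      simp only [String.toList_append, PySem.Str.toList_join, List.map_cons]
      rw [join_cons_ne _ _ _ (by simpa using hne)]

-- A's loop over range(len(ps)), started from any accumulator, appends exactly spRows ps.
theorem loopA_eq (ps : List String) (acc : String) :
    ((PySem.List.pyRange 0 (ps.length : Int) 1).foldl
      (fun code i =>
        let code :=
          if i == (ps.length : Int) - 1 then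
            code ++ PySem.List.pyGetD ps i ""
          else
            code ++ PySem.List.pyGetD ps i "" ++ ", "
        if PySem.Int.mod (i + 1) 6 == 0 then code ++ "\n" else code) acc)
    = acc ++ spRows ps := by
  by_cases h : ps.length ≤ 6
  · rcases ps with _|⟨a0,_|⟨a1,_|⟨a2,_|⟨a3,_|⟨a4,_|⟨a5,_|⟨a6,t⟩⟩⟩⟩⟩⟩⟩
    · rw [spRows]
      norm_num
      apply String.toList_inj.mp
      simp [PySem.Str.toList_join, PySem.Chars.join_nil]
    · rw [spRows]
      norm_num
      rw [show PySem.List.pyRange 0 (1:Int) 1 = [0] from by decide]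
      norm_num [PySem.List.pyGetD_ofNat', PySem.Int.mod]
      apply String.toList_inj.mp
      simp [PySem.Str.toList_join, PySem.Chars.join_singleton]
    · rw [spRows]
      norm_num
      rw [show PySem.List.pyRange 0 (2:Int) 1 = [0,1] from by decide]
      norm_num [PySem.List.pyGetD_ofNat', PySem.Int.mod]
      apply String.toList_inj.mp
      simp [PySem.Str.toList_join, PySem.Chars.join_cons_cons, PySem.Chars.join_singleton]
    · rw [spRows]
      norm_num
      rw [show PySem.List.pyRange 0 (3:Int) 1 = [0,1,2] from by decide]
      norm_num [PySem.List.pyGetD_ofNat', PySem.Int.mod]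
      apply String.toList_inj.mp
      simp [PySem.Str.toList_join, PySem.Chars.join_cons_cons, PySem.Chars.join_singleton]
    · rw [spRows]
      norm_num
      rw [show PySem.List.pyRange 0 (4:Int) 1 = [0,1,2,3] from by decide]
      norm_num [PySem.List.pyGetD_ofNat', PySem.Int.mod]
      apply String.toList_inj.mp
      simp [PySem.Str.toList_join, PySem.Chars.join_cons_cons, PySem.Chars.join_singleton]
    · rw [spRows]
      norm_num
      rw [show PySem.List.pyRange 0 (5:Int) 1 = [0,1,2,3,4] from by decide]
      norm_num [PySem.List.pyGetD_ofNat', PySem.Int.mod]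
      apply String.toList_inj.mp
      simp [PySem.Str.toList_join, PySem.Chars.join_cons_cons, PySem.Chars.join_singleton]
    · rw [spRows]
      norm_num
      rw [show PySem.List.pyRange 0 (6:Int) 1 = [0,1,2,3,4,5] from by decide]
      norm_num [PySem.List.pyGetD_ofNat', PySem.Int.mod]
      apply String.toList_inj.mp
      simp [PySem.Str.toList_join, PySem.Chars.join_cons_cons, PySem.Chars.join_singleton]
    · exfalso; simp at h; omega
  · rcases ps with _|⟨a0,_|⟨a1,_|⟨a2,_|⟨a3,_|⟨a4,_|⟨a5,t⟩⟩⟩⟩⟩⟩ <;>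
      try (exfalso; simp at h; done)
    have ht : 1 ≤ t.length := by simp at h; omega
    have hlen : (((a0::a1::a2::a3::a4::a5::t : List String)).length : Int) = (t.length : Int) + 6 := by
      simp; ring
    rw [hlen]
    rw [PySem.List.pyRange_one_append 0 6 ((t.length:Int)+6) (by omega) (by omega), List.foldl_append]
    rw [show PySem.List.pyRange 0 (6:Int) 1 = [0,1,2,3,4,5] from by decide]
    have hne : ∀ i : Int, 0 ≤ i → i < 6 → ¬(i = (t.length:Int)+6-1) := by
      intro i h1 h2; omega
    have hm : ∀ i : Int, PySem.Int.mod i 6 = i % 6 := fun i => PySem.Int.mod_eq_emod_of_pos (by omega)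
    norm_num [PySem.List.pyGetD_ofNat', hm, hne]
    have hsh : PySem.List.pyRange 6 ((t.length:Int) + 6) 1
        = (PySem.List.pyRange 0 ((t.length:Int)) 1).map (fun k => k + 6) := by
      rw [PySem.List.pyRange_one, PySem.List.pyRange_one, List.map_map]
      have h1 : ((t.length:Int) + 6 - 6).toNat = ((t.length:Int) - 0).toNat := by omega
      rw [h1]
      refine List.map_congr_left ?_
      intro x _
      simp [Function.comp]
      omega
    rw [hsh, List.foldl_map]
    have hfun : ∀ (code : String), ∀ x ∈ PySem.List.pyRange 0 ((t.length:Int)) 1,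
        (fun (code : String) (i : Int) =>
          if 6 ∣ i + 1 then
            (if i = (t.length:Int) + 6 - 1 then code ++ PySem.List.pyGetD (a0::a1::a2::a3::a4::a5::t) i ""
              else code ++ PySem.List.pyGetD (a0::a1::a2::a3::a4::a5::t) i "" ++ ", ") ++ "\n"
          else
            if i = (t.length:Int) + 6 - 1 then code ++ PySem.List.pyGetD (a0::a1::a2::a3::a4::a5::t) i ""
            else code ++ PySem.List.pyGetD (a0::a1::a2::a3::a4::a5::t) i "" ++ ", ") code (x + 6)
        = (fun (code : String) (i : Int) =>
            let code := if i == (t.length : Int) - 1 then code ++ PySem.List.pyGetD t i ""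
              else code ++ PySem.List.pyGetD t i "" ++ ", "
            if PySem.Int.mod (i + 1) 6 == 0 then code ++ "\n" else code) code x := by
      intro code x hx
      have hx' := PySem.List.mem_pyRange_one.mp hx
      have hget : PySem.List.pyGetD (a0::a1::a2::a3::a4::a5::t) (x+6) "" = PySem.List.pyGetD t x "" := by
        rw [show (a0::a1::a2::a3::a4::a5::t : List String) = [a0,a1,a2,a3,a4,a5] ++ t from rfl,
            PySem.List.pyGetD_of_nonneg _ _ (by omega), PySem.List.pyGetD_of_nonneg _ _ (by omega),
            List.getD_eq_getElem?_getD, List.getD_eq_getElem?_getD,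
            List.getElem?_append_right (by simp; omega)]
        have hidx : (x+6).toNat - ([a0,a1,a2,a3,a4,a5] : List String).length = x.toNat := by
          simp; omega
        rw [hidx]
      have h1' : (x + 6 = (t.length:Int) + 6 - 1) ↔ (x = (t.length:Int) - 1) := by omega
      have h2' : ((6:Int) ∣ x + 6 + 1) ↔ ((6:Int) ∣ x + 1) := by omega
      simp only [hget, hm, beq_iff_eq, PySem.Int.emod_eq_zero_iff_dvd, h1', h2']
    rw [PySem.List.foldl_congr_mem _ _ _ _ hfun]
    rw [loopA_eq t]
    have hTake : PySem.List.slice (a0::a1::a2::a3::a4::a5::t) none (some 6) = [a0,a1,a2,a3,a4,a5] := by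
      rw [PySem.List.slice_to _ (by omega : (0:Int) ≤ 6)]
      rfl
    have hDrop : PySem.List.slice (a0::a1::a2::a3::a4::a5::t) (some 6) none = t := by
      rw [PySem.List.slice_from _ (by omega : (0:Int) ≤ 6)]
      rfl
    conv_rhs => rw [spRows]
    rw [if_neg h, hTake, hDrop]
    apply String.toList_inj.mp
    simp [PySem.Str.toList_join, PySem.Chars.join_cons_cons, PySem.Chars.join_singleton]

-- ===== VERDICT (by name: the statement is the Claim_ definition above) =====
theorem supported_param_spec : Claim_equal_supported_param := by
  intro ps _
  unfold Spec_supported_param supported_param supported_param_alt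
  dsimp only
  rw [loopA_eq, ← rowsB_eq ps]
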